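-- pv_equiv track=rewrite | github.com/Regenplatz/Coding | Python/Games/TicTacToe.py | showOccupation
-- ===== SOURCE A (Python) =====
-- playersToken = " X "
--
-- computersToken = " O "
--
-- def showOccupation(cells):
--     """
--     create a dictionary that lists all cell indices per kind of cell occupancy
--     :param cells: dictionary, updated occupation of all cells of the game board
--     :return: dictionary, for each kind of cell occupancy list corresponding cell indices
--     """
--     cellOccupation = {playersToken: [], computersToken: [], "free": []}
--     for key, value in cells.items():
--         if value == playersToken:
--             cellOccupation[playersToken].append(key)
--         elif value == computersToken:
--             cellOccupation[computersToken].append(key)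
--         else:
--             cellOccupation["free"].append(key)
--     return cellOccupation
-- ===== SOURCE B (Python) =====
-- playersToken = " X "
--
-- computersToken = " O "
--
-- def showOccupation(cells):
--     """Build each occupancy bucket independently with its own comprehension."""
--     return {
--         playersToken: [k for k, v in cells.items() if v == playersToken],
--         computersToken: [k for k, v in cells.items() if v == computersToken],
--         "free": [k for k, v in cells.items() if v != playersToken and v != computersToken],
--     }
-- ===== Notes on version B (the rewrite author's own statement) =====
-- stated objective: simpler
-- what changed: Replaces the single-pass if/elif/else accumulation into a pre-built mutable dict with three independent filtering comprehensions, one per bucket, returned as a dict literal.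
import Mathlib
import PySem

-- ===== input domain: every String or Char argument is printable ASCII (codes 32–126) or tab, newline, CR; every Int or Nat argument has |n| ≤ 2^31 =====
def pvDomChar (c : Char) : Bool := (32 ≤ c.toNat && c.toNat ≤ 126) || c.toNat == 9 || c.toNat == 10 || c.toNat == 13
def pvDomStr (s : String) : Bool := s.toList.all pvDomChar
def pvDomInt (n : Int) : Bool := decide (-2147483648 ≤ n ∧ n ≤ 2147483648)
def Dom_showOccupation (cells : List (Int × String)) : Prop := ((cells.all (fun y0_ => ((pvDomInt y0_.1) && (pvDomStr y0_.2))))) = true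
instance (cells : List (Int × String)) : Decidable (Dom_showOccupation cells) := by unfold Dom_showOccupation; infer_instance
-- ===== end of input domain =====

-- B replaces A's one-pass if/elif/else accumulation into a mutable dict with three independent filtering passes (simpler decomposition; return value only).

-- ===== PORT A =====
def showOccupationStep (d : PySem.Dict String (List Int)) (kv : Int × String) :
    PySem.Dict String (List Int) :=
  if kv.2 == " X " then d.modify " X " [] (· ++ [kv.1])
  else if kv.2 == " O " then d.modify " O " [] (· ++ [kv.1])
  else d.modify "free" [] (· ++ [kv.1])

def showOccupation (cells : List (Int × String)) : List (String × List Int) :=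
  (cells.foldl showOccupationStep
    (PySem.Dict.ofList [(" X ", ([] : List Int)), (" O ", []), ("free", [])])).items

-- ===== PORT B =====
def showOccupation_alt (cells : List (Int × String)) : List (String × List Int) :=
  [(" X ", (cells.filter (fun kv => kv.2 == " X ")).map (·.1)),
   (" O ", (cells.filter (fun kv => kv.2 == " O ")).map (·.1)),
   ("free", (cells.filter (fun kv => kv.2 != " X " && kv.2 != " O ")).map (·.1))]

-- ===== PRECONDITION & SPEC =====
def Spec_showOccupation (cells : List (Int × String)) (out : List (String × List Int)) : Prop := out = showOccupation_alt cells
instance (cells : List (Int × String)) (out : List (String × List Int)) : Decidable (Spec_showOccupation cells out) := by unfold Spec_showOccupation; infer_instance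

-- ===== CLAIM (what is proved, stated in full; the proofs are below) =====
def Claim_equal_showOccupation : Prop := ∀ (cells : List (Int × String)), Dom_showOccupation cells → Spec_showOccupation cells (showOccupation cells)

-- ===== LEMMAS AND PROOFS =====

theorem showOccupationStep_eq (p c f : List Int) (k : Int) (v : String) :
    showOccupationStep (PySem.Dict.mk [(" X ", p), (" O ", c), ("free", f)]) (k, v) =
      if v = " X " then PySem.Dict.mk [(" X ", p ++ [k]), (" O ", c), ("free", f)]
      else if v = " O " then PySem.Dict.mk [(" X ", p), (" O ", c ++ [k]), ("free", f)]
      else PySem.Dict.mk [(" X ", p), (" O ", c), ("free", f ++ [k])] := by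
  by_cases hx : v = " X "
  · simp [showOccupationStep, hx, PySem.Dict.modify, PySem.Dict.getD, PySem.Dict.get?,
      PySem.Dict.contains, PySem.Dict.insert, PySem.Dict.items]
  · by_cases ho : v = " O "
    · simp [showOccupationStep, hx, ho, PySem.Dict.modify, PySem.Dict.getD, PySem.Dict.get?,
        PySem.Dict.contains, PySem.Dict.insert, PySem.Dict.items]
    · simp [showOccupationStep, hx, ho, PySem.Dict.modify, PySem.Dict.getD, PySem.Dict.get?,
        PySem.Dict.contains, PySem.Dict.insert, PySem.Dict.items]

theorem showOccupation_fold_items (cells : List (Int × String)) (p c f : List Int) :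
    (cells.foldl showOccupationStep
      (PySem.Dict.mk [(" X ", p), (" O ", c), ("free", f)])).items =
    [(" X ", p ++ (cells.filter (fun kv => kv.2 == " X ")).map (·.1)),
     (" O ", c ++ (cells.filter (fun kv => kv.2 == " O ")).map (·.1)),
     ("free", f ++ (cells.filter (fun kv => kv.2 != " X " && kv.2 != " O ")).map (·.1))] := by
  induction cells generalizing p c f with
  | nil => simp
  | cons kv rest ih =>
    obtain ⟨k, v⟩ := kv
    rw [List.foldl_cons, showOccupationStep_eq]
    split_ifs with hx ho
    · rw [ih]; simp [hx]
    · rw [ih]; simp [hx, ho]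
    · rw [ih]; simp [hx, ho]

-- ===== VERDICT (by name: the statement is the Claim_ definition above) =====
theorem showOccupation_spec : Claim_equal_showOccupation := by
  intro cells _
  show showOccupation cells = showOccupation_alt cells
  simpa [showOccupation, PySem.Dict.ofList, showOccupation_alt] using
    showOccupation_fold_items cells [] [] []
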